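-- pv_equiv track=rewrite | github.com/wahabprop/Dev-Sequence | dev_sequence.py | wahab_seq
-- ===== SOURCE A (Python) =====
-- def digit_sum(n):
--     return sum(int(d) for d in str(n))
--
-- def wahab_seq(n_terms):
--     seq, n = [], 0
--     last = None
--
--     while len(seq) < n_terms:
--         val = 9 * n + 6
--         if digit_sum(val) == 6:
--             if last is None or digit_sum(val - last) == 9:
--                 seq.append(val)
--                 last = val
--         n += 1
--
--     return seq
-- ===== SOURCE B (Python) =====
-- def digit_sum(n):
--     return sum(int(d) for d in str(n))
--
-- def wahab_seq(n_terms):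
--     # Enumerate the numbers with digit sum 6 directly (sums of six powers of 10,
--     # top power 10**k per round, remaining exponents nonincreasing, ascending order)
--     # instead of scanning every multiple-of-9-plus-6 and summing its digits.
--     seq, last, k = [], None, 0
--     while len(seq) < n_terms:
--         for e2 in range(k + 1):
--             for e3 in range(e2 + 1):
--                 for e4 in range(e3 + 1):
--                     for e5 in range(e4 + 1):
--                         for e6 in range(e5 + 1):
--                             val = 10**k + 10**e2 + 10**e3 + 10**e4 + 10**e5 + 10**e6
--                             if len(seq) < n_terms and (last is None or digit_sum(val - last) == 9):
--                                 seq.append(val)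
--                                 last = val
--         k += 1
--     return seq
-- ===== Notes on version B (the rewrite author's own statement) =====
-- stated objective: faster
-- what changed: Instead of scanning every value 9n+6 up to the last term and summing its digits, B enumerates exactly the numbers with digit sum 6 in increasing order as sums of six powers of ten (nonincreasing exponent tuples in lex order) and applies the same gap filter, so the per-term cost is polynomial in the number of digits rather than linear in the value.
import Mathlib
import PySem

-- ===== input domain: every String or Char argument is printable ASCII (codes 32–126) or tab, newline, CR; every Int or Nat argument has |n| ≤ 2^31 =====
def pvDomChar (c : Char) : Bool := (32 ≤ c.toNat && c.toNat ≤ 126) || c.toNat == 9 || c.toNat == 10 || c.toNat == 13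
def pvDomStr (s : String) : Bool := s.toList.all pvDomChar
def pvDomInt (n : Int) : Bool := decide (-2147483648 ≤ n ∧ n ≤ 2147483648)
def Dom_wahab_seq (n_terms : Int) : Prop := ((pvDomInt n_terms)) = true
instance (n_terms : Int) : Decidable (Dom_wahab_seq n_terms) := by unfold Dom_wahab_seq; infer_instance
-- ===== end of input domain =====

-- B enumerates the numbers with digit sum 6 directly (as sums of six powers of ten in
-- increasing order) instead of scanning every value 9n+6 and summing its digits; same
-- gap filter, same output.  The `f : Nat` fuel arguments below only make the two while
-- loops total; the proofs show the fuel is never the binding constraint.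

-- ===== PORT A =====
-- digit_sum(n) = sum(int(d) for d in str(n)); every character of str(n) for the
-- nonnegative n this program feeds it is a digit, so int(d) never raises and the
-- getD 0 default is unreachable.
def wahab_digit_sum (n : Int) : Int :=
  ((PySem.Int.toChars n).map (fun d => (PySem.Int.ofChars? [d]).getD 0)).sum

-- the while loop of A: state (seq, n, last), one candidate val = 9*n+6 per iteration
def wahabLoopA (f : Nat) (t : Int) (seq : List Int) (n : Int) (last : Option Int) : List Int :=
  if (seq.length : Int) < t then
    match f with
    | 0 => seq
    | f+1 =>
      let val := 9 * n + 6
      if wahab_digit_sum val == 6 then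
        if (match last with | none => true | some l => wahab_digit_sum (val - l) == 9) then
          wahabLoopA f t (seq ++ [val]) (n+1) (some val)
        else wahabLoopA f t seq (n+1) last
      else wahabLoopA f t seq (n+1) last
  else seq

def wahab_seq (n_terms : Int) : List Int := wahabLoopA (7 * 10 ^ n_terms.toNat) n_terms [] 0 none

-- ===== PORT B =====
-- the while loop of B: per round k the five nested for loops emit every number
-- 10^k + 10^e2 + ... + 10^e6 (k ≥ e2 ≥ ... ≥ e6) in increasing order
def wahabLoopB (f : Nat) (t : Int) (seq : List Int) (last : Option Int) (k : Nat) : List Int :=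
  if (seq.length : Int) < t then
    match f with
    | 0 => seq
    | f+1 =>
      let st := (List.range (k+1)).foldl (fun st1 e2 =>
        (List.range (e2+1)).foldl (fun st2 e3 =>
          (List.range (e3+1)).foldl (fun st3 e4 =>
            (List.range (e4+1)).foldl (fun st4 e5 =>
              (List.range (e5+1)).foldl (fun st5 e6 =>
                let val : Int := 10^k + 10^e2 + 10^e3 + 10^e4 + 10^e5 + 10^e6
                if decide ((st5.1.length : Int) < t) &&
                    (match st5.2 with | none => true | some l => wahab_digit_sum (val - l) == 9) then
                  (st5.1 ++ [val], some val)
                else st5) st4) st3) st2) st1) (seq, last)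
      wahabLoopB f t st.1 st.2 (k+1)
  else seq

def wahab_seq_alt (n_terms : Int) : List Int := wahabLoopB (n_terms.toNat + 2) n_terms [] none 0

-- ===== PRECONDITION & SPEC =====
def Spec_wahab_seq (n_terms : Int) (out : List Int) : Prop := out = wahab_seq_alt n_terms
instance (n_terms : Int) (out : List Int) : Decidable (Spec_wahab_seq n_terms out) := by unfold Spec_wahab_seq; infer_instance

-- ===== CLAIM (what is proved, stated in full; the proofs are below) =====
def Claim_equal_wahab_seq : Prop := ∀ (n_terms : Int), Dom_wahab_seq n_terms → Spec_wahab_seq n_terms (wahab_seq n_terms)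

-- ===== LEMMAS AND PROOFS =====

def dsN (v : Nat) : Nat := (Nat.digits 10 v).sum

lemma parse_digitChar (d : Nat) (hd : d < 10) :
    (PySem.Int.ofChars? [Nat.digitChar d]).getD 0 = (d : Int) := by
  interval_cases d <;> decide

lemma toDigitsCore_eq (f : Nat) : ∀ n acc, 0 < n → n < 10 ^ f →
    Nat.toDigitsCore 10 f n acc = ((Nat.digits 10 n).map Nat.digitChar).reverse ++ acc := by
  induction f with
  | zero => intro n acc h1 h2; omega
  | succ f ih =>
    intro n acc h1 h2
    rw [Nat.toDigitsCore]
    by_cases h : n / 10 = 0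
    · have hn : n < 10 := by omega
      rw [if_pos h, Nat.digits_def' (by norm_num) h1, h]
      simp
    · rw [if_neg h, ih (n / 10) _ (Nat.pos_of_ne_zero h) (by
        have hp : (10:Nat) ^ (f+1) = 10 ^ f * 10 := by ring
        omega)]
      rw [Nat.digits_def' (by norm_num) h1]
      simp

lemma pyDS_cast (v : Nat) : wahab_digit_sum (v : Int) = (dsN v : Int) := by
  have hnn : ¬ ((v : Int) < 0) := by omega
  unfold wahab_digit_sum
  rw [show PySem.Int.toChars (v : Int) = Nat.toDigits 10 v by
    simp [PySem.Int.toChars, hnn]]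
  rcases Nat.eq_zero_or_pos v with h | h
  · subst h; decide
  · rw [show Nat.toDigits 10 v = ((Nat.digits 10 v).map Nat.digitChar).reverse ++ [] by
      exact toDigitsCore_eq (v+1) v [] h (by
        have := Nat.lt_pow_self (by norm_num : 1 < 10) (n := v+1)
        omega)]
    rw [List.append_nil, List.map_reverse, List.sum_reverse, List.map_map]
    rw [List.map_congr_left (fun d hd => by
      simpa using parse_digitChar d (Nat.digits_lt_base (by norm_num) hd))]
    simp [dsN]

lemma ds_rec (y : Nat) (hy : 0 < y) : dsN y = y % 10 + dsN (y / 10) := by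
  unfold dsN
  rw [Nat.digits_def' (by norm_num : 1 < 10) hy]
  simp

lemma ds_le_self (v : Nat) : dsN v ≤ v := Nat.digit_sum_le 10 v

lemma ds_mod9 (v : Nat) : v % 9 = dsN v % 9 :=
  Nat.modEq_digits_sum 9 10 (by norm_num) v

lemma ds_add_pow (e : Nat) : ∀ y : Nat, (y / 10 ^ e) % 10 < 9 →
    dsN (10 ^ e + y) = dsN y + 1 := by
  induction e with
  | zero =>
    intro y h
    simp only [pow_zero] at *
    rcases Nat.eq_zero_or_pos y with h0 | h0
    · subst h0; decide
    · rw [ds_rec (1 + y) (by omega), ds_rec y h0]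
      have h1 : (1 + y) % 10 = y % 10 + 1 := by omega
      have h2 : (1 + y) / 10 = y / 10 := by omega
      rw [h1, h2]; ring
  | succ e ih =>
    intro y h
    have hx : 0 < 10 ^ (e+1) + y := by positivity
    rw [ds_rec _ hx]
    have hp : (10:Nat) ^ (e+1) = 10 ^ e * 10 := by ring
    have h1 : (10 ^ (e+1) + y) % 10 = y % 10 := by omega
    have h2 : (10 ^ (e+1) + y) / 10 = 10 ^ e + y / 10 := by omega
    rw [h1, h2, ih (y / 10) (by
      have : y / 10 / 10 ^ e = y / 10 ^ (e+1) := by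
        rw [Nat.div_div_eq_div_mul]; congr 1; ring
      rw [this]; exact h)]
    rcases Nat.eq_zero_or_pos y with h0 | h0
    · subst h0; simp [dsN]
    · rw [ds_rec y h0]; ring

lemma le_ds_mul_pow (e : Nat) : ∀ y : Nat, y < 10 ^ (e+1) → y ≤ dsN y * 10 ^ e := by
  induction e with
  | zero =>
    intro y h
    rw [pow_one] at h
    rcases Nat.eq_zero_or_pos y with h0 | h0
    · omega
    · rw [ds_rec y h0]
      have : y / 10 = 0 := by omega
      rw [this]
      simp only [dsN, Nat.digits_zero, List.sum_nil, pow_zero, mul_one]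
      omega
  | succ e ih =>
    intro y h
    rcases Nat.eq_zero_or_pos y with h0 | h0
    · omega
    · have hd : y / 10 < 10 ^ (e+1) := by
        have hp : (10:Nat) ^ (e+2) = 10 ^ (e+1) * 10 := by ring
        omega
      have := ih (y / 10) hd
      rw [ds_rec y h0]
      have hy : y = y % 10 + 10 * (y / 10) := by omega
      calc y = y % 10 + 10 * (y / 10) := hy
        _ ≤ y % 10 + 10 * (dsN (y/10) * 10 ^ e) := by omega
        _ = y % 10 * 1 + dsN (y/10) * 10 ^ (e+1) := by ring
        _ ≤ y % 10 * 10 ^ (e+1) + dsN (y/10) * 10 ^ (e+1) := by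
            have : (1:Nat) ≤ 10 ^ (e+1) := Nat.one_le_pow _ _ (by norm_num)
            exact Nat.add_le_add_right (Nat.mul_le_mul_left _ this) _
        _ = (y % 10 + dsN (y/10)) * 10 ^ (e+1) := by ring

lemma ds_eq_zero_iff (v : Nat) : dsN v = 0 ↔ v = 0 := by
  constructor
  · intro h
    have h1 : v < 10 ^ (v+1) := by
      have := Nat.lt_pow_self (by norm_num : 1 < 10) (n := v)
      calc v < 10 ^ v := this
        _ ≤ 10 ^ (v+1) := Nat.pow_le_pow_right (by norm_num) (by omega)
    have := le_ds_mul_pow v v h1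
    rw [h] at this; omega
  · intro h; subst h; decide

lemma ds_9pow (p : Nat) : dsN (9 * 10 ^ p) = 9 := by
  induction p with
  | zero => decide
  | succ p ih =>
    have hx : 0 < 9 * 10 ^ (p+1) := by positivity
    rw [ds_rec _ hx]
    have hp : (10:Nat) ^ (p+1) = 10 ^ p * 10 := by ring
    have h1 : 9 * 10 ^ (p+1) % 10 = 0 := by omega
    have h2 : 9 * 10 ^ (p+1) / 10 = 9 * 10 ^ p := by omega
    rw [h1, h2, ih]

-- bounds for the top digit position
lemma pow_topPos_le (v : Nat) (hv : 0 < v) :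
    10 ^ ((Nat.digits 10 v).length - 1) ≤ v ∧ v < 10 ^ ((Nat.digits 10 v).length - 1 + 1) := by
  have hlen : 0 < (Nat.digits 10 v).length := by
    rw [List.length_pos_iff]
    exact Nat.digits_ne_nil_iff_ne_zero.2 (by omega)
  have hup : v < 10 ^ (Nat.digits 10 v).length :=
    Nat.lt_base_pow_length_digits (by norm_num)
  have hlow : 10 ^ (Nat.digits 10 v).length ≤ 10 * v :=
    Nat.base_pow_length_digits_le 10 v (by norm_num) (by omega)
  set L := (Nat.digits 10 v).length
  have hLe : L - 1 + 1 = L := by omega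
  have hsplit : (10:Nat) ^ L = 10 * 10 ^ (L - 1) := by
    conv_lhs => rw [← hLe]
    rw [pow_succ]; ring
  constructor
  · omega
  · rw [hLe]; exact hup

lemma ds_pump (v : Nat) (hv : 0 < v) :
    dsN (v + 9 * 10 ^ ((Nat.digits 10 v).length - 1)) = dsN v := by
  set q := (Nat.digits 10 v).length - 1 with hq
  obtain ⟨hlo, hhi⟩ := pow_topPos_le v hv
  rw [← hq] at hlo hhi
  have hpow : 0 < (10:Nat) ^ q := Nat.pow_pos (by norm_num)
  set y := v - 10 ^ q with hy
  have hvy : v = 10 ^ q + y := by omega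
  -- digit of y at position q is a - 1 ≤ 8
  have hdiv : y / 10 ^ q = v / 10 ^ q - 1 := by
    have h1 : y = 10 ^ q * (v / 10 ^ q - 1) + v % 10 ^ q := by
      have hdm := Nat.div_add_mod v (10 ^ q)
      have ha1 : 1 ≤ v / 10 ^ q := (Nat.one_le_div_iff hpow).2 hlo
      have hms : 10 ^ q * (v / 10 ^ q - 1) = 10 ^ q * (v / 10 ^ q) - 10 ^ q := by
        rw [Nat.mul_sub]; ring_nf
      have hb : 10 ^ q ≤ 10 ^ q * (v / 10 ^ q) := Nat.le_mul_of_pos_right _ ha1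
      omega
    rw [h1, Nat.mul_add_div hpow, Nat.div_eq_of_lt (Nat.mod_lt _ hpow)]
    omega
  have ha9 : v / 10 ^ q ≤ 9 := by
    have := Nat.div_mul_le_self v (10 ^ q)
    by_contra hgt
    push_neg at hgt
    have h10 : 10 * 10 ^ q ≤ (v / 10 ^ q) * 10 ^ q := Nat.mul_le_mul_right _ (by omega)
    have hp : (10:Nat) ^ (q+1) = 10 * 10 ^ q := by ring
    omega
  have h1 : (y / 10 ^ q) % 10 < 9 := by
    rw [hdiv]; omega
  have e1 : dsN v = dsN y + 1 := by
    rw [hvy]; exact ds_add_pow q y h1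
  have h2 : (y / 10 ^ (q+1)) % 10 < 9 := by
    have : y / 10 ^ (q+1) = 0 := Nat.div_eq_of_lt (by omega)
    rw [this]; omega
  have e2 : dsN (v + 9 * 10 ^ q) = dsN y + 1 := by
    have : v + 9 * 10 ^ q = 10 ^ (q+1) + y := by
      rw [hvy]; ring
    rw [this]; exact ds_add_pow (q+1) y h2
  omega

lemma ds_split_top (x : Nat) (hx : 0 < x) :
    dsN x = dsN (x - 10 ^ ((Nat.digits 10 x).length - 1)) + 1 := by
  set q := (Nat.digits 10 x).length - 1 with hq
  obtain ⟨hlo, hhi⟩ := pow_topPos_le x hx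
  rw [← hq] at hlo hhi
  have hpow : 0 < (10:Nat) ^ q := Nat.pow_pos (by norm_num)
  set y := x - 10 ^ q with hy
  have hvy : x = 10 ^ q + y := by omega
  have hdiv : y / 10 ^ q = x / 10 ^ q - 1 := by
    have h1 : y = 10 ^ q * (x / 10 ^ q - 1) + x % 10 ^ q := by
      have hdm := Nat.div_add_mod x (10 ^ q)
      have ha1 : 1 ≤ x / 10 ^ q := (Nat.one_le_div_iff hpow).2 hlo
      have hms : 10 ^ q * (x / 10 ^ q - 1) = 10 ^ q * (x / 10 ^ q) - 10 ^ q := by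
        rw [Nat.mul_sub]; ring_nf
      have hb : 10 ^ q ≤ 10 ^ q * (x / 10 ^ q) := Nat.le_mul_of_pos_right _ ha1
      omega
    rw [h1, Nat.mul_add_div hpow, Nat.div_eq_of_lt (Nat.mod_lt _ hpow)]
    omega
  have ha9 : x / 10 ^ q ≤ 9 := by
    have := Nat.div_mul_le_self x (10 ^ q)
    by_contra hgt
    push_neg at hgt
    have h10 : 10 * 10 ^ q ≤ (x / 10 ^ q) * 10 ^ q := Nat.mul_le_mul_right _ (by omega)
    have hp : (10:Nat) ^ (q+1) = 10 * 10 ^ q := by ring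
    omega
  have h1 : (y / 10 ^ q) % 10 < 9 := by
    rw [hdiv]; omega
  conv_lhs => rw [hvy]
  exact ds_add_pow q y h1

def genL : Nat → Nat → List Nat
  | 0, _ => [0]
  | m+1, cap => (List.range (cap+1)).flatMap (fun e => (genL m e).map (fun x => 10 ^ e + x))

lemma genL_mem (m : Nat) (hm : m ≤ 9) : ∀ (cap : Nat) (x : Nat),
    x ∈ genL m cap ↔ dsN x = m ∧ x ≤ m * 10 ^ cap := by
  induction m with
  | zero =>
    intro cap x
    simp only [genL, List.mem_singleton]
    rw [ds_eq_zero_iff]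
    omega
  | succ m ih =>
    intro cap x
    constructor
    · intro hx
      simp only [genL, List.mem_flatMap, List.mem_map, List.mem_range] at hx
      obtain ⟨e, he, y, hy, rfl⟩ := hx
      obtain ⟨hds, hle⟩ := (ih (by omega) e y).1 hy
      have hdig : (y / 10 ^ e) % 10 < 9 := by
        have h1 : y / 10 ^ e ≤ m := by
          have := Nat.div_le_div_right (c := 10 ^ e) hle
          rwa [Nat.mul_div_cancel _ (Nat.pow_pos (by norm_num))] at this
        have h2 : (y / 10 ^ e) % 10 <= y / 10 ^ e := Nat.mod_le _ _
        omega
      refine ⟨by rw [ds_add_pow e y hdig, hds], ?_⟩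
      have hpm : (10:Nat) ^ e ≤ 10 ^ cap := Nat.pow_le_pow_right (by norm_num) (by omega)
      calc 10 ^ e + y ≤ 10 ^ e + m * 10 ^ e := by omega
        _ = (m+1) * 10 ^ e := by ring
        _ ≤ (m+1) * 10 ^ cap := Nat.mul_le_mul_left _ hpm
    · rintro ⟨hds, hle⟩
      have hx0 : 0 < x := by
        rcases Nat.eq_zero_or_pos x with h | h
        · exfalso; rw [h, (ds_eq_zero_iff 0).2 rfl] at hds; omega
        · exact h
      set e := (Nat.digits 10 x).length - 1 with he
      obtain ⟨hlo, hhi⟩ := pow_topPos_le x hx0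
      rw [← he] at hlo hhi
      have hecap : e ≤ cap := by
        by_contra hgt
        push_neg at hgt
        have h1 : (10:Nat) ^ (cap+1) ≤ 10 ^ e := Nat.pow_le_pow_right (by norm_num) (by omega)
        have h2 : (m+1) * 10 ^ cap < 10 * 10 ^ cap := by
          have : 0 < (10:Nat) ^ cap := Nat.pow_pos (by norm_num)
          have := (Nat.mul_lt_mul_right this).2 (show m+1 < 10 by omega)
          omega
        have hp : (10:Nat) ^ (cap+1) = 10 * 10 ^ cap := by ring
        omega
      set y := x - 10 ^ e with hy
      have hdsy : dsN y = m := by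
        have := ds_split_top x hx0
        rw [← he, ← hy] at this
        omega
      have hyle : y ≤ m * 10 ^ e := by
        have h1 : y < 10 ^ (e+1) := by omega
        have := le_ds_mul_pow e y h1
        rwa [hdsy] at this
      simp only [genL, List.mem_flatMap, List.mem_map, List.mem_range]
      exact ⟨e, by omega, y, (ih (by omega) e y).2 ⟨hdsy, hyle⟩, by omega⟩

lemma genL_append (m cap : Nat) :
    genL (m+1) (cap+1) = genL (m+1) cap ++ (genL m (cap+1)).map (fun x => 10 ^ (cap+1) + x) := by
  show (List.range (cap+2)).flatMap _ = _
  rw [List.range_succ, List.flatMap_append]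
  simp [genL]

lemma genL_sorted (m : Nat) (hm : m ≤ 9) : ∀ cap, List.Pairwise (· < ·) (genL m cap) := by
  induction m with
  | zero => intro cap; simp [genL]
  | succ m ih =>
    intro cap
    induction cap with
    | zero =>
      show List.Pairwise _ ((List.range 1).flatMap _)
      simp only [List.range_one, List.flatMap_cons, List.flatMap_nil, List.append_nil]
      exact (List.pairwise_map).2 ((ih (by omega) 0).imp (by omega))
    | succ cap ihc =>
      rw [genL_append]
      rw [List.pairwise_append]
      refine ⟨ihc, (List.pairwise_map).2 ((ih (by omega) (cap+1)).imp (by omega)), ?_⟩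
      intro a ha b hb
      obtain ⟨hdsa, hlea⟩ := (genL_mem (m+1) hm cap a).1 ha
      simp only [List.mem_map] at hb
      obtain ⟨y, hy, rfl⟩ := hb
      have h2 : (m+1) * 10 ^ cap < 10 ^ (cap+1) := by
        have hp : (10:Nat) ^ (cap+1) = 10 * 10 ^ cap := by ring
        have : 0 < (10:Nat) ^ cap := Nat.pow_pos (by norm_num)
        have := (Nat.mul_lt_mul_right this).2 (show m+1 < 10 by omega)
        omega
      omega

-- the common accept/step pair
def wsAccept (t : Int) (st : List Int × Option Int) (v : Int) : Bool :=
  decide ((st.1.length : Int) < t) && (wahab_digit_sum v == 6) &&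
    (match st.2 with | none => true | some l => wahab_digit_sum (v - l) == 9)

def gStep (t : Int) (st : List Int × Option Int) (v : Int) : List Int × Option Int :=
  if wsAccept t st v then (st.1 ++ [v], some v) else st

lemma gStep_cases (t : Int) (st : List Int × Option Int) (v : Int) :
    gStep t st v = st ∨ (wsAccept t st v = true ∧ gStep t st v = (st.1 ++ [v], some v)) := by
  unfold gStep; split
  · right; exact ⟨by assumption, rfl⟩
  · left; rfl

lemma gStep_of_not_lt (t : Int) (st : List Int × Option Int) (v : Int)
    (h : ¬ ((st.1.length : Int) < t)) : gStep t st v = st := by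
  unfold gStep wsAccept
  simp [h]

lemma foldl_freeze (t : Int) (l : List Int) (st : List Int × Option Int)
    (h : ¬ ((st.1.length : Int) < t)) : List.foldl (gStep t) st l = st := by
  induction l with
  | nil => rfl
  | cons x xs ih => rw [List.foldl_cons, gStep_of_not_lt t st x h, ih]

lemma gStep_len (t : Int) (st : List Int × Option Int) (v : Int) :
    (gStep t st v).1.length = st.1.length ∨
      ((gStep t st v).1.length = st.1.length + 1 ∧ (st.1.length : Int) < t) := by
  unfold gStep; split
  · rename_i h
    right
    constructor
    · simp
    · unfold wsAccept at h
      simp only [Bool.and_eq_true, decide_eq_true_eq] at h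
      exact h.1.1
  · left; rfl

lemma foldl_len_mono (t : Int) (l : List Int) : ∀ st : List Int × Option Int,
    st.1.length ≤ (List.foldl (gStep t) st l).1.length := by
  induction l with
  | nil => intro st; simp
  | cons x xs ih =>
    intro st
    rw [List.foldl_cons]
    rcases gStep_len t st x with h | h
    · calc st.1.length = (gStep t st x).1.length := h.symm
        _ ≤ _ := ih _
    · calc st.1.length ≤ (gStep t st x).1.length := by omega
        _ ≤ _ := ih _

lemma foldl_len_cap (t : Int) (l : List Int) : ∀ st : List Int × Option Int,
    ((List.foldl (gStep t) st l).1.length : Int) ≤ max (st.1.length : Int) t := by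
  induction l with
  | nil => intro st; simp
  | cons x xs ih =>
    intro st
    rw [List.foldl_cons]
    rcases gStep_len t st x with h | h
    · calc ((List.foldl (gStep t) (gStep t st x) xs).1.length : Int)
          ≤ max ((gStep t st x).1.length : Int) t := ih _
        _ ≤ _ := by rw [h]
    · calc ((List.foldl (gStep t) (gStep t st x) xs).1.length : Int)
          ≤ max ((gStep t st x).1.length : Int) t := ih _
        _ ≤ _ := by
            have h1 := h.1
            have h2 := h.2
            omega

lemma foldl_stuck (t : Int) (l : List Int) : ∀ st : List Int × Option Int,
    (List.foldl (gStep t) st l).1.length = st.1.length →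
    List.foldl (gStep t) st l = st := by
  induction l with
  | nil => intro st _; rfl
  | cons x xs ih =>
    intro st hlen
    rw [List.foldl_cons] at hlen ⊢
    rcases gStep_cases t st x with h | h
    · rw [h] at hlen ⊢; exact ih st hlen
    · exfalso
      have h1 : (gStep t st x).1.length = st.1.length + 1 := by rw [h.2]; simp
      have := foldl_len_mono t xs (gStep t st x)
      omega

lemma foldl_last (t : Int) (l : List Int) : ∀ st : List Int × Option Int,
    List.foldl (gStep t) st l = st ∨
      ∃ v ∈ l, (List.foldl (gStep t) st l).2 = some v := by
  induction l with
  | nil => intro st; left; rfl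
  | cons x xs ih =>
    intro st
    rw [List.foldl_cons]
    rcases gStep_cases t st x with h | h
    · rw [h]
      rcases ih st with h2 | ⟨v, hv, h2⟩
      · left; exact h2
      · right; exact ⟨v, List.mem_cons_of_mem _ hv, h2⟩
    · rcases ih (gStep t st x) with h2 | ⟨v, hv, h2⟩
      · right
        refine ⟨x, List.mem_cons_self, ?_⟩
        rw [h2, h.2]
      · right; exact ⟨v, List.mem_cons_of_mem _ hv, h2⟩

def wsOk (o : Option Int) (w : Int) : Prop :=
  wahab_digit_sum w = 6 ∧ (∀ l, o = some l → wahab_digit_sum (w - l) = 9)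

lemma accept_of_ok (t : Int) (st : List Int × Option Int) (w : Int)
    (hlen : (st.1.length : Int) < t) (hok : wsOk st.2 w) : wsAccept t st w = true := by
  unfold wsAccept
  simp only [Bool.and_eq_true, decide_eq_true_eq, beq_iff_eq]
  refine ⟨⟨hlen, hok.1⟩, ?_⟩
  cases h : st.2 with
  | none => rfl
  | some l => simpa using hok.2 l h

-- the key lemma: after folding over a sorted list, no member above the final last is acceptable
lemma foldl_key (t : Int) (l : List Int) : ∀ st : List Int × Option Int,
    l.Pairwise (· < ·) →
    ((List.foldl (gStep t) st l).1.length : Int) < t →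
    ∀ w ∈ l, wsOk (List.foldl (gStep t) st l).2 w →
    ∃ v, (List.foldl (gStep t) st l).2 = some v ∧ w ≤ v := by
  induction l with
  | nil => intro st _ _ w hw; exact absurd hw (List.not_mem_nil)
  | cons x xs ih =>
    intro st hsort hlen w hw hok
    rw [List.foldl_cons] at hlen hok ⊢
    have hxlt : ∀ y ∈ xs, x < y := fun y hy => (List.pairwise_cons.1 hsort).1 y hy
    have hsort' : xs.Pairwise (· < ·) := (List.pairwise_cons.1 hsort).2
    rcases List.mem_cons.1 hw with rfl | hwxs
    · -- w = x
      rcases gStep_cases t st w with h | h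
      · -- not accepted at processing time
        rw [h] at hlen hok ⊢
        -- the state must have changed later (or the gap test failed then but passes now)
        rcases foldl_last t xs st with h2 | ⟨v, hv, h2⟩
        · -- nothing changed at all: st was final; w acceptable wrt st.2, len < t → accepted, contra
          exfalso
          rw [h2] at hlen hok
          have hacc := accept_of_ok t st w hlen hok
          have hstep : gStep t st w = (st.1 ++ [w], some w) := by
            unfold gStep; rw [hacc]; simp
          have hbad : (st.1 ++ [w], some w) = st := hstep.symm.trans h
          have := congrArg (fun p => p.1.length) hbad
          simp at this
        · exact ⟨v, h2, le_of_lt (hxlt v hv)⟩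
      · -- accepted: last becomes some w, then stays or becomes a later (bigger) element
        rw [h.2] at hlen hok ⊢
        rcases foldl_last t xs (st.1 ++ [w], some w) with h2 | ⟨v, hv, h2⟩
        · rw [h2]
          exact ⟨w, rfl, le_refl w⟩
        · exact ⟨v, h2, le_of_lt (hxlt v hv)⟩
    · exact ih (gStep t st x) hsort' hlen w hwxs hok

def canonN (B : Nat) : List Nat := (List.range B).filter (fun v => dsN v == 6)
def canonI (B : Nat) : List Int := (canonN B).map (fun v : Nat => (v : Int))
def Lfold (t : Int) (B : Nat) : List Int × Option Int :=
  List.foldl (gStep t) ([], none) (canonI B)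

lemma canonN_sorted (B : Nat) : (canonN B).Pairwise (· < ·) :=
  List.Pairwise.sublist (List.filter_sublist) (List.pairwise_lt_range)

lemma canonI_sorted (B : Nat) : (canonI B).Pairwise (· < ·) := by
  unfold canonI
  refine List.pairwise_map.mpr ((canonN_sorted B).imp ?_)
  intro a b h
  exact_mod_cast h

lemma canonI_mem (B : Nat) (x : Int) :
    x ∈ canonI B ↔ ∃ v : Nat, x = (v : Int) ∧ dsN v = 6 ∧ v < B := by
  unfold canonI canonN
  rw [List.mem_map]
  constructor
  · rintro ⟨v, hv, rfl⟩
    rw [List.mem_filter] at hv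
    exact ⟨v, rfl, by simpa using hv.2, by simpa using hv.1⟩
  · rintro ⟨v, rfl, hds, hv⟩
    exact ⟨v, by rw [List.mem_filter]; exact ⟨by simpa using hv, by simpa using hds⟩, rfl⟩

lemma canonI_prefix {B1 B2 : Nat} (h : B1 ≤ B2) :
    ∃ ext, canonI B2 = canonI B1 ++ ext := by
  refine ⟨(((List.range (B2 - B1)).map (fun i => B1 + i)).filter (fun v => dsN v == 6)).map
    (fun v : Nat => (v : Int)), ?_⟩
  unfold canonI canonN
  rw [show B2 = B1 + (B2 - B1) by omega, List.range_add, List.filter_append, List.map_append]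
  simp

lemma Lfold_mono (t : Int) {B1 B2 : Nat} (h : B1 ≤ B2) :
    (Lfold t B1).1.length ≤ (Lfold t B2).1.length := by
  obtain ⟨ext, hx⟩ := canonI_prefix h
  unfold Lfold
  rw [hx, List.foldl_append]
  exact foldl_len_mono t ext _

lemma Lfold_progress (t : Int) (B : Nat) (hB : 7 ≤ B)
    (hlen : ((Lfold t (10 * B)).1.length : Int) < t) :
    (Lfold t B).1.length < (Lfold t (10 * B)).1.length := by
  by_contra hle
  push_neg at hle
  have heq : (Lfold t (10 * B)).1.length = (Lfold t B).1.length :=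
    le_antisymm hle (Lfold_mono t (by omega))
  obtain ⟨ext, hx⟩ := canonI_prefix (show B ≤ 10 * B by omega)
  have hsplit : Lfold t (10 * B) = List.foldl (gStep t) (Lfold t B) ext := by
    unfold Lfold
    rw [hx, List.foldl_append]
  have hstuck : Lfold t (10 * B) = Lfold t B := by
    rw [hsplit]
    exact foldl_stuck t ext _ (by rw [← hsplit]; exact heq)
  -- now use the key lemma on the full 10*B fold
  have hF : List.foldl (gStep t) ([], none) (canonI (10 * B)) = Lfold t (10 * B) := rfl
  cases hL : (Lfold t (10 * B)).2 with
  | none =>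
    obtain ⟨v, hv, -⟩ := foldl_key t (canonI (10 * B)) ([], none) (canonI_sorted _) hlen
      6 ((canonI_mem _ _).2 ⟨6, rfl, by decide, by omega⟩)
      ⟨by rw [show (6:Int) = ((6:Nat):Int) by norm_num, pyDS_cast]; decide,
       fun l hl => by rw [hF, hL] at hl; cases hl⟩
    rw [hF, hL] at hv; cases hv
  | some x =>
    -- the last accepted value comes from canonI B
    have h2 : ∃ vn : Nat, (x : Int) = (vn : Int) ∧ dsN vn = 6 ∧ vn < B := by
      rcases foldl_last t (canonI B) ([], none) with h3 | ⟨v, hv, h3⟩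
      · exfalso
        have : (Lfold t (10*B)).2 = (none : Option Int) := by
          rw [hstuck]; unfold Lfold; rw [h3]
        rw [hL] at this; cases this
      · have : (Lfold t (10*B)).2 = some v := by rw [hstuck]; exact h3
        rw [hL] at this
        obtain ⟨vn, hvn, hds, hlt⟩ := (canonI_mem B v).1 hv
        exact ⟨vn, by rw [show x = v by injection this, hvn], hds, hlt⟩
    obtain ⟨vn, hxv, hds, hlt⟩ := h2
    have hv0 : 0 < vn := by
      have := ds_le_self vn
      omega
    set q := (Nat.digits 10 vn).length - 1 with hq
    obtain ⟨hqlo, hqhi⟩ := pow_topPos_le vn hv0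
    rw [← hq] at hqlo hqhi
    set wn := vn + 9 * 10 ^ q with hw
    have hdsw : dsN wn = 6 := by rw [hw, ← hq] at *; rw [ds_pump vn hv0] at *; exact hds ▸ rfl
    have hwlt : wn < 10 * B := by omega
    have hok : wsOk (Lfold t (10 * B)).2 (wn : Int) := by
      refine ⟨by rw [pyDS_cast, hdsw]; norm_num, fun l hl => ?_⟩
      rw [hL] at hl
      injection hl with hl
      rw [← hl, hxv]
      have : (wn : Int) - (vn : Int) = ((9 * 10 ^ q : Nat) : Int) := by
        push_cast [hw]; ring
      rw [this, pyDS_cast, ds_9pow]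
      norm_num
    obtain ⟨v', hv', hle'⟩ := foldl_key t (canonI (10 * B)) ([], none) (canonI_sorted _) hlen
      (wn : Int) ((canonI_mem _ _).2 ⟨wn, rfl, hdsw, hwlt⟩) hok
    rw [hF, hL] at hv'
    injection hv' with hv'
    have hxle : (wn : Int) ≤ x := hv' ▸ hle'
    rw [hxv] at hxle
    have : wn ≤ vn := by exact_mod_cast hxle
    have hpow : 0 < (10:Nat) ^ q := Nat.pow_pos (by norm_num)
    omega

lemma Lfold_suf (t : Int) (ht : 1 ≤ t) : ∀ j : Nat,
    min t.toNat (j + 1) ≤ (Lfold t (7 * 10 ^ j)).1.length := by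
  intro j
  induction j with
  | zero =>
    have hc : canonI 7 = [(6 : Int)] := by decide
    have hacc : wsAccept t ([], none) 6 = true := by
      unfold wsAccept
      simp only [Bool.and_eq_true, decide_eq_true_eq, beq_iff_eq]
      refine ⟨⟨by simpa using ht, ?_⟩, by trivial⟩
      rw [show (6:Int) = ((6:Nat):Int) by norm_num, pyDS_cast]; decide
    have : Lfold t 7 = ([6], some 6) := by
      unfold Lfold
      rw [hc]
      simp [gStep, hacc]
    simp only [pow_zero, Nat.mul_one, this]
    simp
  | succ j ih =>
    have hmono := Lfold_mono t (show 7 * 10 ^ j ≤ 7 * 10 ^ (j+1) by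
      have : (10:Nat) ^ j ≤ 10 ^ (j+1) := Nat.pow_le_pow_right (by norm_num) (by omega)
      omega)
    by_cases hfull : ((Lfold t (7 * 10 ^ (j+1))).1.length : Int) < t
    · have hprog := Lfold_progress t (7 * 10 ^ j) (by
        have : 0 < (10:Nat) ^ j := Nat.pow_pos (by norm_num)
        omega) (by
        rw [show 10 * (7 * 10 ^ j) = 7 * 10 ^ (j+1) by ring]
        exact hfull)
      rw [show 10 * (7 * 10 ^ j) = 7 * 10 ^ (j+1) by ring] at hprog
      omega
    · push_neg at hfull
      have : t.toNat ≤ (Lfold t (7 * 10 ^ (j+1))).1.length := by omega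
      omega

lemma Lfold_exact (t : Int) (ht : 1 ≤ t) :
    (Lfold t (7 * 10 ^ t.toNat)).1.length = t.toNat := by
  have h1 := Lfold_suf t ht t.toNat
  have h2 := foldl_len_cap t (canonI (7 * 10 ^ t.toNat)) ([], none)
  unfold Lfold at *
  simp only [List.length_nil] at h2
  omega

lemma Lfold_stable (t : Int) (ht : 1 ≤ t) {B : Nat} (hB : 7 * 10 ^ t.toNat ≤ B) :
    Lfold t B = Lfold t (7 * 10 ^ t.toNat) := by
  obtain ⟨ext, hx⟩ := canonI_prefix hB
  unfold Lfold
  rw [hx, List.foldl_append]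
  apply foldl_freeze
  have := Lfold_exact t ht
  unfold Lfold at this
  rw [this]
  omega

-- ==== stage 6 ====

-- B's step function (no digit-sum test: its candidates all have digit sum 6)
def gStepB (t : Int) (st : List Int × Option Int) (v : Int) : List Int × Option Int :=
  if decide ((st.1.length : Int) < t) &&
      (match st.2 with | none => true | some l => wahab_digit_sum (v - l) == 9) then
    (st.1 ++ [v], some v)
  else st

lemma gStepB_of_not_lt (t : Int) (st : List Int × Option Int) (v : Int)
    (h : ¬ ((st.1.length : Int) < t)) : gStepB t st v = st := by
  unfold gStepB
  simp [h]

lemma foldlB_freeze (t : Int) (l : List Int) (st : List Int × Option Int)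
    (h : ¬ ((st.1.length : Int) < t)) : List.foldl (gStepB t) st l = st := by
  induction l with
  | nil => rfl
  | cons x xs ih => rw [List.foldl_cons, gStepB_of_not_lt t st x h, ih]

lemma gStepB_eq_gStep (t : Int) (st : List Int × Option Int) (v : Int)
    (h : wahab_digit_sum v = 6) : gStepB t st v = gStep t st v := by
  unfold gStepB gStep wsAccept
  rw [h]
  simp

lemma foldlB_eq_foldl (t : Int) (l : List Int) (hl : ∀ v ∈ l, wahab_digit_sum v = 6) :
    ∀ st, List.foldl (gStepB t) st l = List.foldl (gStep t) st l := by
  induction l with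
  | nil => intro st; rfl
  | cons x xs ih =>
    intro st
    rw [List.foldl_cons, List.foldl_cons,
      gStepB_eq_gStep t st x (hl x List.mem_cons_self),
      ih (fun v hv => hl v (List.mem_cons_of_mem _ hv))]

lemma foldl_flatMap {α β γ : Type} (f : γ → α → γ) (g : β → List α) (l : List β) :
    ∀ s : γ, List.foldl f s (l.flatMap g) = l.foldl (fun s e => List.foldl f s (g e)) s := by
  induction l with
  | nil => intro s; rfl
  | cons x xs ih =>
    intro s
    rw [List.flatMap_cons, List.foldl_append, List.foldl_cons, ih]

-- generic equality of strictly sorted lists with the same members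
lemma sorted_mem_eq {l1 l2 : List Nat} (h1 : l1.Pairwise (· < ·)) (h2 : l2.Pairwise (· < ·))
    (hm : ∀ a, a ∈ l1 ↔ a ∈ l2) : l1 = l2 := by
  refine List.Perm.eq_of_pairwise (fun a b _ _ hab hba => by omega) h1 h2 ?_
  refine (List.perm_ext_iff_of_nodup ?_ ?_).2 hm
  · exact h1.imp (fun h => by omega)
  · exact h2.imp (fun h => by omega)

-- ===== A side =====

lemma gStep_acc_true (t : Int) (st : List Int × Option Int) (v : Int)
    (h : wsAccept t st v = true) : gStep t st v = (st.1 ++ [v], some v) := by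
  unfold gStep
  rw [h]
  simp

lemma gStep_acc_false (t : Int) (st : List Int × Option Int) (v : Int)
    (h : wsAccept t st v = false) : gStep t st v = st := by
  unfold gStep
  rw [h]
  simp

lemma loopA_eq (t : Int) (f : Nat) : ∀ (seq : List Int) (n : Int) (last : Option Int),
    wahabLoopA f t seq n last =
      (List.foldl (gStep t) (seq, last)
        ((List.range f).map (fun i : Nat => 9 * (n + (i : Int)) + 6))).1 := by
  induction f with
  | zero =>
    intro seq n last
    rw [wahabLoopA]
    simp
  | succ f ih =>
    intro seq n last
    by_cases hlen : ((seq.length : Int) < t)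
    · have hrange : (List.range (f+1)).map (fun i : Nat => 9 * (n + (i : Int)) + 6) =
          (9 * n + 6) :: (List.range f).map (fun i : Nat => 9 * ((n+1) + (i : Int)) + 6) := by
        rw [List.range_succ_eq_map, List.map_cons, List.map_map]
        refine congrArg₂ (· :: ·) (by push_cast; ring) ?_
        refine List.map_congr_left (fun i hi => ?_)
        simp only [Function.comp_apply, Nat.succ_eq_add_one]
        push_cast
        ring
      rw [hrange, List.foldl_cons]
      cases last with
      | none =>
        have hunf : wahabLoopA (f+1) t seq n none =
            (if wahab_digit_sum (9 * n + 6) == 6 then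
              wahabLoopA f t (seq ++ [9 * n + 6]) (n+1) (some (9 * n + 6))
            else wahabLoopA f t seq (n+1) none) := by
          rw [wahabLoopA, if_pos hlen]
          rfl
        rw [hunf]
        by_cases hds : (wahab_digit_sum (9 * n + 6) == 6) = true
        · have hacc : wsAccept t (seq, none) (9 * n + 6) = true := by
            unfold wsAccept
            simp only [hds, Bool.and_true, decide_eq_true_eq]
            exact hlen
          rw [if_pos hds, gStep_acc_true t _ _ hacc, ih (seq ++ [9*n+6]) (n+1) (some (9*n+6))]
        · have hacc : wsAccept t (seq, none) (9 * n + 6) = false := by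
            unfold wsAccept
            simp only [Bool.and_eq_false_iff]
            left; right
            simpa using hds
          rw [if_neg (by simpa using hds), gStep_acc_false t _ _ hacc, ih seq (n+1) none]
      | some lv =>
        have hunf : wahabLoopA (f+1) t seq n (some lv) =
            (if wahab_digit_sum (9 * n + 6) == 6 then
              (if wahab_digit_sum ((9 * n + 6) - lv) == 9 then
                wahabLoopA f t (seq ++ [9 * n + 6]) (n+1) (some (9 * n + 6))
              else wahabLoopA f t seq (n+1) (some lv))
            else wahabLoopA f t seq (n+1) (some lv)) := by
          rw [wahabLoopA, if_pos hlen]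
        rw [hunf]
        by_cases hds : (wahab_digit_sum (9 * n + 6) == 6) = true
        · by_cases hgap : (wahab_digit_sum ((9 * n + 6) - lv) == 9) = true
          · have hacc : wsAccept t (seq, some lv) (9 * n + 6) = true := by
              unfold wsAccept
              simp only [hds, hgap, Bool.and_true, decide_eq_true_eq]
              exact hlen
            rw [if_pos hds, if_pos hgap, gStep_acc_true t _ _ hacc,
              ih (seq ++ [9*n+6]) (n+1) (some (9*n+6))]
          · have hacc : wsAccept t (seq, some lv) (9 * n + 6) = false := by
              unfold wsAccept
              simp only [Bool.and_eq_false_iff]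
              right
              simpa using hgap
            rw [if_pos hds, if_neg (by simpa using hgap), gStep_acc_false t _ _ hacc,
              ih seq (n+1) (some lv)]
        · have hacc : wsAccept t (seq, some lv) (9 * n + 6) = false := by
            unfold wsAccept
            simp only [Bool.and_eq_false_iff]
            left; right
            simpa using hds
          rw [if_neg (by simpa using hds), gStep_acc_false t _ _ hacc, ih seq (n+1) (some lv)]
    · rw [wahabLoopA, if_neg hlen, foldl_freeze t _ _ (by simpa using hlen)]

lemma genL_zero (cap : Nat) : genL 0 cap = [0] := rfl
lemma genL_succ (m cap : Nat) : genL (m+1) cap =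
    (List.range (cap+1)).flatMap (fun e => (genL m e).map (fun x => 10 ^ e + x)) := rfl

def blockI (k : Nat) : List Int := (genL 5 k).map (fun x : Nat => ((10 ^ k + x : Nat) : Int))

lemma beq_cast_nat (a b : Nat) : (((a : Int)) == ((b : Int))) = (a == b) := by
  by_cases h : a = b
  · simp [h]
  · simp [h]

lemma nest_eq (t : Int) (k : Nat) (st : List Int × Option Int) :
    (List.range (k+1)).foldl (fun st1 e2 =>
      (List.range (e2+1)).foldl (fun st2 e3 =>
        (List.range (e3+1)).foldl (fun st3 e4 =>
          (List.range (e4+1)).foldl (fun st4 e5 =>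
            (List.range (e5+1)).foldl (fun st5 e6 =>
              let val : Int := 10^k + 10^e2 + 10^e3 + 10^e4 + 10^e5 + 10^e6
              if decide ((st5.1.length : Int) < t) &&
                  (match st5.2 with | none => true | some l => wahab_digit_sum (val - l) == 9) then
                (st5.1 ++ [val], some val)
              else st5) st4) st3) st2) st1) st
    = List.foldl (gStepB t) st (blockI k) := by
  conv_rhs => rw [blockI]
  simp only [List.foldl_map, genL_succ, genL_zero, foldl_flatMap, List.foldl_cons,
    List.foldl_nil, gStepB]
  simp only [Nat.cast_add, Nat.cast_pow, Nat.cast_ofNat, add_zero, add_assoc]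

lemma loopB_eq (t : Int) (f : Nat) : ∀ (seq : List Int) (last : Option Int) (k : Nat),
    wahabLoopB f t seq last k =
      (List.foldl (gStepB t) (seq, last)
        (((List.range f).map (fun j : Nat => blockI (k + j))).flatten)).1 := by
  induction f with
  | zero =>
    intro seq last k
    rw [wahabLoopB]
    simp
  | succ f ih =>
    intro seq last k
    by_cases hlen : ((seq.length : Int) < t)
    · have hsplit : ((List.range (f+1)).map (fun j : Nat => blockI (k + j))).flatten =
          blockI k ++ ((List.range f).map (fun j : Nat => blockI ((k+1) + j))).flatten := by
        rw [List.range_succ_eq_map, List.map_cons, List.flatten_cons, List.map_map]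
        have hm : List.map ((fun j : Nat => blockI (k + j)) ∘ Nat.succ) (List.range f) =
            List.map (fun j : Nat => blockI ((k+1) + j)) (List.range f) :=
          List.map_congr_left (fun j hj => by
            simp only [Function.comp_apply, Nat.succ_eq_add_one]
            congr 1
            omega)
        rw [hm, Nat.add_zero]
      have hunf : wahabLoopB (f+1) t seq last k =
          wahabLoopB f t
            ((List.foldl (gStepB t) (seq, last) (blockI k)).1)
            ((List.foldl (gStepB t) (seq, last) (blockI k)).2) (k+1) := by
        rw [wahabLoopB, if_pos hlen, ← nest_eq t k (seq, last)]
      rw [hunf, hsplit, List.foldl_append, ih]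
    · rw [wahabLoopB, if_neg hlen, foldlB_freeze t _ _ (by simpa using hlen)]

-- ===== candidate-list equalities =====

lemma aList_filter (F : Nat) :
    ((List.range F).map (fun i => 9 * i + 6)).filter (fun v => dsN v == 6) = canonN (9 * F + 6) := by
  refine sorted_mem_eq ?_ (canonN_sorted _) ?_
  · exact List.Pairwise.sublist (List.filter_sublist)
      (List.pairwise_map.2 ((List.pairwise_lt_range).imp (by omega)))
  · intro a
    unfold canonN
    simp only [List.mem_filter, List.mem_map, List.mem_range, beq_iff_eq]
    constructor
    · rintro ⟨⟨i, hi, rfl⟩, hds⟩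
      exact ⟨by omega, hds⟩
    · rintro ⟨ha, hds⟩
      have h9 : a % 9 = 6 := by
        have := ds_mod9 a
        rw [hds] at this
        omega
      have h6 : 6 ≤ a := by
        have := ds_le_self a
        omega
      exact ⟨⟨(a - 6) / 9, by omega, by omega⟩, hds⟩

lemma genL6_canon (cap : Nat) : genL 6 cap = canonN (6 * 10 ^ cap + 1) := by
  refine sorted_mem_eq (genL_sorted 6 (by norm_num) cap) (canonN_sorted _) ?_
  intro a
  rw [genL_mem 6 (by norm_num) cap a]
  unfold canonN
  simp only [List.mem_filter, List.mem_range, beq_iff_eq]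
  omega

lemma flat_blocks (K : Nat) (hK : 1 ≤ K) :
    ((List.range K).map (fun j : Nat => blockI j)).flatten =
      (genL 6 (K-1)).map (fun v : Nat => (v : Int)) := by
  have h1 : genL 6 (K-1) = (List.range K).flatMap (fun e => (genL 5 e).map (fun x => 10^e + x)) := by
    rw [genL_succ, show K - 1 + 1 = K from by omega]
  rw [← List.flatMap_def, h1, List.map_flatMap]
  simp only [blockI, List.map_map]
  rfl

-- skip lemma for A's fold over non-digit-sum-6 candidates
lemma foldl_skipA (t : Int) (l : List Int) : ∀ st,
    List.foldl (gStep t) st l =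
      List.foldl (gStep t) st (l.filter (fun v => wahab_digit_sum v == 6)) := by
  induction l with
  | nil => intro st; rfl
  | cons x xs ih =>
    intro st
    rw [List.filter_cons]
    by_cases hds : (wahab_digit_sum x == 6) = true
    · rw [if_pos hds, List.foldl_cons, List.foldl_cons, ih]
    · have hacc : wsAccept t st x = false := by
        unfold wsAccept
        simp only [Bool.and_eq_false_iff]
        left; right
        simpa using hds
      rw [if_neg hds, List.foldl_cons, gStep_acc_false t _ _ hacc, ih]

lemma rawA_cast (F : Nat) :
    (List.range F).map (fun i : Nat => 9 * ((0:Int) + (i : Int)) + 6) =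
      ((List.range F).map (fun i => 9 * i + 6)).map (fun v : Nat => (v : Int)) := by
  rw [List.map_map]
  refine List.map_congr_left (fun i hi => ?_)
  simp only [Function.comp_apply]
  push_cast
  ring

lemma filter_cast (l : List Nat) :
    (l.map (fun v : Nat => (v : Int))).filter (fun v => wahab_digit_sum v == 6) =
      (l.filter (fun v => dsN v == 6)).map (fun v : Nat => (v : Int)) := by
  rw [List.filter_map]
  congr 1
  refine List.filter_congr (fun v _ => ?_)
  simp only [Function.comp_apply, pyDS_cast]
  exact beq_cast_nat (dsN v) 6

theorem main_eq (t : Int) : wahab_seq t = wahab_seq_alt t := by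
  by_cases ht : 1 ≤ t
  · have hpow : 0 < (10:Nat) ^ t.toNat := Nat.pow_pos (by norm_num)
    have hA : wahab_seq t = (Lfold t (7 * 10 ^ t.toNat)).1 := by
      rw [wahab_seq, loopA_eq, rawA_cast, foldl_skipA, filter_cast, aList_filter]
      rw [show (canonN (9 * (7 * 10 ^ t.toNat) + 6)).map (fun v : Nat => (v:Int)) =
        canonI (9 * (7 * 10 ^ t.toNat) + 6) from rfl]
      rw [show List.foldl (gStep t) ([], none) (canonI (9 * (7 * 10 ^ t.toNat) + 6)) =
        Lfold t (9 * (7 * 10 ^ t.toNat) + 6) from rfl]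
      rw [Lfold_stable t ht (by omega)]
    have hB : wahab_seq_alt t = (Lfold t (7 * 10 ^ t.toNat)).1 := by
      rw [wahab_seq_alt, loopB_eq]
      simp only [Nat.zero_add]
      rw [flat_blocks (t.toNat + 2) (by omega), show t.toNat + 2 - 1 = t.toNat + 1 from by omega]
      rw [foldlB_eq_foldl t _ (by
        intro v hv
        rw [List.mem_map] at hv
        obtain ⟨vn, hvn, rfl⟩ := hv
        have := ((genL_mem 6 (by norm_num) (t.toNat+1) vn).1 hvn).1
        rw [pyDS_cast, this]
        norm_num)]
      rw [genL6_canon]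
      rw [show (canonN (6 * 10 ^ (t.toNat+1) + 1)).map (fun v : Nat => (v:Int)) =
        canonI (6 * 10 ^ (t.toNat+1) + 1) from rfl]
      rw [show List.foldl (gStep t) ([], none) (canonI (6 * 10 ^ (t.toNat+1) + 1)) =
        Lfold t (6 * 10 ^ (t.toNat+1) + 1) from rfl]
      rw [Lfold_stable t ht (by
        have hp : (10:Nat) ^ (t.toNat+1) = 10 * 10 ^ t.toNat := by ring
        omega)]
    rw [hA, hB]
  · have h0 : ¬ ((([]:List Int).length : Int) < t) := by simp; omega
    rw [wahab_seq, loopA_eq, foldl_freeze t _ _ h0, wahab_seq_alt, loopB_eq,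
      foldlB_freeze t _ _ h0]

-- ===== VERDICT (by name: the statement is the Claim_ definition above) =====
theorem wahab_seq_spec : Claim_equal_wahab_seq := fun n_terms _ => main_eq n_terms
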